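-- pv_equiv track=rewrite | github.com/ChagitAsulin/DB5786_6769_6789 | Programing/generateData_realistic.py | unique_names
-- ===== SOURCE A (Python) =====
-- def unique_names(base_list, count, prefix_suffix=""):
--     names = []
--     index = 0
--     while len(names) < count:
--         base = base_list[index % len(base_list)]
--         cycle = index // len(base_list) + 1
--         if cycle == 1:
--             name = f"{base}{prefix_suffix}"
--         else:
--             name = f"{base} - Unit {cycle:02d}{prefix_suffix}"
--         names.append(name)
--         index += 1
--     return names
-- ===== SOURCE B (Python) =====
-- def unique_names(base_list, count, prefix_suffix=""):
--     if count <= 0: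
--         return []
--     # ceiling division; raises ZeroDivisionError on empty base_list just like A
--     cycles = -(-count // len(base_list))
--     tags = ["" if c == 0 else f" - Unit {c + 1:02d}" for c in range(cycles)]
--     # column-major: one column of names per base, then transpose row by row and truncate
--     columns = [[base + tag + prefix_suffix for tag in tags] for base in base_list]
--     names = [col[c] for c in range(cycles) for col in columns]
--     return names[:count]
-- ===== Notes on version B (the rewrite author's own statement) =====
-- stated objective: alternative
-- what changed: B builds a transposed matrix column-major (one column of finished names per base entry, over a precomputed per-cycle tag list) and then transposes it row by row and truncates, instead of A's single while loop that recovers cycle/position from index // len and index % len per element.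
import Mathlib
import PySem

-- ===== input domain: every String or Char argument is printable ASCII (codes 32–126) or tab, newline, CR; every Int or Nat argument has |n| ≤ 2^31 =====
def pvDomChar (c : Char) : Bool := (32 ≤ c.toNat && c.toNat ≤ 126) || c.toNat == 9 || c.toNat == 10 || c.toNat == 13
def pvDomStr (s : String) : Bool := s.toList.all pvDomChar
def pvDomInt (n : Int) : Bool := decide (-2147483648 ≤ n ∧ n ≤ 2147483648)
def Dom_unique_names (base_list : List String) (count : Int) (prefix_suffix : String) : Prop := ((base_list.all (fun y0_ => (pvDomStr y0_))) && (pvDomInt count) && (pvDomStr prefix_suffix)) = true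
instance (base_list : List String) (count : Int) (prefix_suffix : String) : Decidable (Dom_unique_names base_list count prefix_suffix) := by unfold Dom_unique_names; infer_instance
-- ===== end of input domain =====

-- B builds a transposed matrix column-major (one finished column per base over a precomputed tag
-- list) and transposes it row by row, instead of A's per-element while loop (objective: alternative).

-- ===== PORT A =====
-- index stays ≥ 0, so Python's index % len and index // len are Nat % and / here
-- (exact by PySem.Int.mod_natCast / floordiv_natCast); base_list[index % len] is in range
-- when base_list ≠ [], hence List.getD; f"{cycle:02d}" for the nonnegative cycle is
-- str(cycle).zfill(2) = PySem.Str.zfill (PySem.Int.toStr cycle) 2.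
def uniqueA_loop (base_list : List String) (count : Int) (prefix_suffix : String)
    (names : List String) (index : Nat) : List String :=
  if h : (names.length : Int) < count then
    if base_list.length = 0 then names  -- Python raises ZeroDivisionError here (excluded by Pre_)
    else
      let base := base_list.getD (index % base_list.length) ""
      let cycle : Int := ((index / base_list.length : Nat) : Int) + 1
      let name := if cycle = 1 then base ++ prefix_suffix
                  else base ++ " - Unit " ++ PySem.Str.zfill (PySem.Int.toStr cycle) 2 ++ prefix_suffix
      uniqueA_loop base_list count prefix_suffix (names ++ [name]) (index + 1)
  else names
termination_by (count - names.length).toNat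
decreasing_by simp; omega

def unique_names (base_list : List String) (count : Int) (prefix_suffix : String) : List String :=
  uniqueA_loop base_list count prefix_suffix [] 0

-- ===== PORT B =====
def unique_names_alt (base_list : List String) (count : Int) (prefix_suffix : String) : List String :=
  if count ≤ 0 then []
  else
    -- ceiling division -(-count // len); on base_list = [] Python raises ZeroDivisionError (excluded by Pre_)
    let cycles : Int := -(PySem.Int.floordiv (-count) (base_list.length : Int))
    let tags : List String := (PySem.List.pyRange 0 cycles 1).map
      (fun c => if c = 0 then "" else " - Unit " ++ PySem.Str.zfill (PySem.Int.toStr (c + 1)) 2)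
    let columns := base_list.map (fun base => tags.map (fun tag => base ++ tag ++ prefix_suffix))
    -- [col[c] for c in range(cycles) for col in columns]; col[c] is in range, hence pyGetD
    let names := (PySem.List.pyRange 0 cycles 1).flatMap
      (fun c => columns.map (fun col => PySem.List.pyGetD col c ""))
    PySem.List.slice names none (some count)

-- ===== PRECONDITION & SPEC =====
-- Pre_ excludes exactly the inputs on which A raises ZeroDivisionError (empty base_list with count > 0);
-- B raises there too.
def Pre_unique_names (base_list : List String) (count : Int) (prefix_suffix : String) : Prop :=
  count ≤ 0 ∨ base_list ≠ []
instance (base_list : List String) (count : Int) (prefix_suffix : String) : Decidable (Pre_unique_names base_list count prefix_suffix) := by unfold Pre_unique_names; infer_instance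

def pvWitness_unique_names : List String × Int × String := (["a", "b"], 3, "!")

def Spec_unique_names (base_list : List String) (count : Int) (prefix_suffix : String) (out : List String) : Prop := out = unique_names_alt base_list count prefix_suffix
instance (base_list : List String) (count : Int) (prefix_suffix : String) (out : List String) : Decidable (Spec_unique_names base_list count prefix_suffix out) := by unfold Spec_unique_names; infer_instance

-- ===== CLAIM (what is proved, stated in full; the proofs are below) =====
def Claim_equal_unique_names : Prop := ∀ (base_list : List String) (count : Int) (prefix_suffix : String), Dom_unique_names base_list count prefix_suffix → Pre_unique_names base_list count prefix_suffix → Spec_unique_names base_list count prefix_suffix (unique_names base_list count prefix_suffix)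

-- ===== LEMMAS AND PROOFS =====

-- the name A's loop computes for global position i
def mkName (base_list : List String) (prefix_suffix : String) (i : Nat) : String :=
  let base := base_list.getD (i % base_list.length) ""
  let cycle : Int := ((i / base_list.length : Nat) : Int) + 1
  if cycle = 1 then base ++ prefix_suffix
  else base ++ " - Unit " ++ PySem.Str.zfill (PySem.Int.toStr cycle) 2 ++ prefix_suffix

lemma uniqueA_loop_eq (base_list : List String) (count : Int) (prefix_suffix : String)
    (hn : base_list.length ≠ 0) :
    ∀ (m : Nat) (names : List String) (index : Nat), (count - names.length).toNat = m →
      uniqueA_loop base_list count prefix_suffix names index =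
        names ++ (List.range m).map (fun j => mkName base_list prefix_suffix (index + j)) := by
  intro m
  induction m with
  | zero =>
    intro names index hm
    rw [uniqueA_loop]
    simp only [List.range_zero, List.map_nil, List.append_nil]
    rw [dif_neg (by omega)]
  | succ m ih =>
    intro names index hm
    rw [uniqueA_loop, dif_pos (by omega), if_neg hn]
    rw [ih (names ++ [_]) (index + 1) (by simp; omega)]
    rw [List.append_assoc, List.singleton_append]
    congr 1
    rw [List.range_succ_eq_map, List.map_cons, List.map_map]
    congr 1
    apply List.map_congr_left
    intro j _
    simp only [Function.comp_apply]
    show mkName base_list prefix_suffix (index + 1 + j) = mkName base_list prefix_suffix (index + (j + 1))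
    congr 1
    omega

-- B's row c, for 0 ≤ c < cycles, is the names of cycle c
lemma row_eq (base_list : List String) (prefix_suffix : String) (cycles : Int)
    (hn : base_list.length ≠ 0) (k : Nat) (hk : (k : Int) < cycles) :
    (base_list.map (fun base =>
        ((PySem.List.pyRange 0 cycles 1).map
          (fun c => if c = 0 then "" else " - Unit " ++ PySem.Str.zfill (PySem.Int.toStr (c + 1)) 2)).map
          (fun tag => base ++ tag ++ prefix_suffix))).map
      (fun col => PySem.List.pyGetD col (k : Int) "") =
    (List.range base_list.length).map
      (fun j => mkName base_list prefix_suffix (k * base_list.length + j)) := by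
  have hcol : ∀ base : String,
      PySem.List.pyGetD
        (((PySem.List.pyRange 0 cycles 1).map
          (fun c => if c = 0 then "" else " - Unit " ++ PySem.Str.zfill (PySem.Int.toStr (c + 1)) 2)).map
          (fun tag => base ++ tag ++ prefix_suffix)) (k : Int) "" =
      base ++ (if (k : Int) = 0 then "" else " - Unit " ++ PySem.Str.zfill (PySem.Int.toStr ((k : Int) + 1)) 2) ++ prefix_suffix := by
    intro base
    rw [List.map_map]
    exact PySem.List.pyGetD_map_pyRange_of_nonneg _ cycles (k : Int) "" (by positivity) hk
  apply List.ext_getElem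
  · simp
  · intro j hj1 hj2
    simp only [List.getElem_map, List.getElem_range]
    rw [hcol]
    have hjlen : j < base_list.length := by simpa using hj1
    unfold mkName
    have hdiv : (k * base_list.length + j) / base_list.length = k := by
      rw [Nat.mul_comm, Nat.mul_add_div (Nat.pos_of_ne_zero hn), Nat.div_eq_of_lt hjlen]
      omega
    have hmod : (k * base_list.length + j) % base_list.length = j := by
      rw [Nat.mul_comm, Nat.mul_add_mod, Nat.mod_eq_of_lt hjlen]
    rw [hdiv, hmod]
    by_cases hk0 : k = 0
    · subst hk0
      simp [List.getD_eq_getElem?_getD, List.getElem?_eq_getElem hjlen]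
    · rw [if_neg (by exact_mod_cast hk0), if_neg (by omega)]
      simp [List.getD_eq_getElem?_getD, List.getElem?_eq_getElem hjlen, String.append_assoc]

-- flattening the rows of all cycles gives the full run of names
lemma flat_rows_eq (base_list : List String) (prefix_suffix : String) (cycles : Int) :
    ∀ (C : Nat), (C : Int) ≤ cycles →
      (List.range C).flatMap (fun k =>
        (List.range base_list.length).map
          (fun j => mkName base_list prefix_suffix (k * base_list.length + j))) =
      (List.range (C * base_list.length)).map (fun i => mkName base_list prefix_suffix i) := by
  intro C
  induction C with
  | zero => intro _; simp
  | succ c ih =>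
    intro hC
    rw [List.range_succ, List.flatMap_append, ih (by push_cast at *; omega)]
    simp only [List.flatMap_cons, List.flatMap_nil, List.append_nil]
    have hrange : List.range ((c + 1) * base_list.length) =
        List.range (c * base_list.length) ++
          (List.range base_list.length).map (fun j => c * base_list.length + j) := by
      rw [Nat.succ_mul, List.range_add]
    rw [hrange, List.map_append, List.map_map]
    rfl

lemma cycles_bounds (count : Int) (n : Int) (hn : 0 < n) :
    (-(PySem.Int.floordiv (-count) n) - 1) * n < count ∧ count ≤ -(PySem.Int.floordiv (-count) n) * n :=
  (PySem.Int.neg_floordiv_neg_eq_iff_of_pos hn).mp rfl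

-- ===== VERDICT (by name: the statement is the Claim_ definition above) =====
theorem unique_names_spec : Claim_equal_unique_names := by
  intro base_list count prefix_suffix _ hpre
  unfold Spec_unique_names unique_names unique_names_alt
  by_cases hc : count ≤ 0
  · rw [if_pos hc, uniqueA_loop, dif_neg (by simp; omega)]
  · rw [if_neg hc]
    have hn : base_list.length ≠ 0 := by
      rcases hpre with h | h
      · omega
      · simpa [List.length_eq_zero_iff] using h
    have hn0 : (0 : Int) < (base_list.length : Int) := by positivity
    obtain ⟨hlo, hhi⟩ := cycles_bounds count (base_list.length : Int) hn0
    set cycles : Int := -(PySem.Int.floordiv (-count) (base_list.length : Int)) with hcy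
    have hcyc1 : 1 ≤ cycles := by nlinarith
    have hC : ((cycles.toNat : Int)) = cycles := Int.toNat_of_nonneg (by omega)
    rw [uniqueA_loop_eq base_list count prefix_suffix hn count.toNat [] 0 (by simp)]
    simp only [List.nil_append]
    -- rewrite B's flatMap into the full run of names
    have hrange : PySem.List.pyRange 0 cycles 1 =
        (List.range cycles.toNat).map (fun k => ((k : Nat) : Int)) := by
      rw [← hC]
      exact PySem.List.pyRange_zero_nat cycles.toNat
    have hB : (PySem.List.pyRange 0 cycles 1).flatMap
        (fun c => (base_list.map (fun base =>
          ((PySem.List.pyRange 0 cycles 1).map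
            (fun c' => if c' = 0 then "" else " - Unit " ++ PySem.Str.zfill (PySem.Int.toStr (c' + 1)) 2)).map
            (fun tag => base ++ tag ++ prefix_suffix))).map
          (fun col => PySem.List.pyGetD col c "")) =
        (List.range (cycles.toNat * base_list.length)).map
          (fun i => mkName base_list prefix_suffix i) := by
      have hmem : ∀ c ∈ PySem.List.pyRange 0 cycles 1,
          (base_list.map (fun base =>
            ((PySem.List.pyRange 0 cycles 1).map
              (fun c' => if c' = 0 then "" else " - Unit " ++ PySem.Str.zfill (PySem.Int.toStr (c' + 1)) 2)).map
              (fun tag => base ++ tag ++ prefix_suffix))).map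
            (fun col => PySem.List.pyGetD col c "") =
          (List.range base_list.length).map
            (fun j => mkName base_list prefix_suffix (c.toNat * base_list.length + j)) := by
        intro c hcmem
        rw [PySem.List.mem_pyRange_one] at hcmem
        have hcn : c = ((c.toNat : Nat) : Int) := (Int.toNat_of_nonneg hcmem.1).symm
        rw [hcn]
        exact row_eq base_list prefix_suffix cycles hn c.toNat (by omega)
      rw [List.flatMap_congr hmem, hrange, List.flatMap_map]
      rw [← flat_rows_eq base_list prefix_suffix cycles cycles.toNat (by omega)]
      apply List.flatMap_congr
      intro k _
      rfl
    rw [hB, PySem.List.slice_to _ (by omega), ← List.map_take, List.take_range]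
    have hle : count.toNat ≤ cycles.toNat * base_list.length := by
      have : (count : Int) ≤ ((cycles.toNat * base_list.length : Nat) : Int) := by push_cast; rw [hC]; exact hhi
      omega
    rw [Nat.min_eq_left hle]
    apply List.map_congr_left
    intro j _
    rw [Nat.zero_add]
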